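-- pv_equiv track=rewrite | github.com/Aiden16/DSA | ARRAY/palindromic-array.py | PalinArray
-- ===== SOURCE A (Python) =====
-- def PalinArray(arr ,n):
--     # Code here
--
--     for i in arr:
--         t = i
--         res = 0
--         while t>0:
--             last = t%10
--             res = 10*res+last
--             t=t//10
--         if res!=i:
--             return 0
--     return 1
-- ===== SOURCE B (Python) =====
-- def PalinArray(arr, n):
--     for i in arr:
--         s = str(i)
--         if s != s[::-1]:
--             return 0
--     return 1
-- ===== Notes on version B (the rewrite author's own statement) =====
-- stated objective: idiomatic
-- what changed: Replaces the arithmetic digit-reversal while-loop (res = 10*res + t%10; t //= 10) per element with the standard string palindrome test str(i) != str(i)[::-1], removing the inner loop.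
import Mathlib
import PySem

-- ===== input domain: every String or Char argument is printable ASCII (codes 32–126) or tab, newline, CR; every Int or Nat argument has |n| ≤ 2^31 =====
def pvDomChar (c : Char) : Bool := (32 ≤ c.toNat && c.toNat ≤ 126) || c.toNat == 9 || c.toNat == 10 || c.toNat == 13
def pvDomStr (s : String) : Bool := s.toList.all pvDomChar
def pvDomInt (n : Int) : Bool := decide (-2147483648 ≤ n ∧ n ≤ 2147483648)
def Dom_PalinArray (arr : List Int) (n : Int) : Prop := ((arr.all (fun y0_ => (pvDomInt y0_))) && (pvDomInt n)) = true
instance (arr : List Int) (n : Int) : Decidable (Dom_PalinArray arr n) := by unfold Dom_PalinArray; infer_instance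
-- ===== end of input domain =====

-- B replaces A's arithmetic digit-reversal inner while-loop with the string palindrome test
-- str(i) != str(i)[::-1] (idiomatic; same asymptotic cost). Equivalence is proved for all Int inputs.

-- ===== PORT A =====
-- the inner 'while t > 0: last = t%10; res = 10*res+last; t = t//10' loop, returning res
def pvRevLoop (t res : Int) : Int :=
  if 0 < t then
    pvRevLoop (PySem.Int.floordiv t 10) (10 * res + PySem.Int.mod t 10)
  else res
termination_by t.toNat
decreasing_by
  rename_i h
  rw [PySem.Int.floordiv_eq_ediv_of_pos (by norm_num)]
  omega

def PalinArray (arr : List Int) (n : Int) : Int :=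
  match arr with
  | [] => 1
  | i :: rest =>
      -- t = i; res = 0; the while loop; 'if res != i: return 0'
      if pvRevLoop i 0 ≠ i then 0 else PalinArray rest n

-- ===== PORT B =====
def PalinArray_alt (arr : List Int) (n : Int) : Int :=
  match arr with
  | [] => 1
  | i :: rest =>
      -- s = str(i); 'if s != s[::-1]: return 0'
      -- s[::-1] is exactly List.reverse on the code points: PySem.Chars.slice?_none_none_neg_one
      let s := PySem.Int.toChars i
      if s ≠ s.reverse then 0 else PalinArray_alt rest n

-- ===== PRECONDITION & SPEC =====
def Spec_PalinArray (arr : List Int) (n : Int) (out : Int) : Prop := out = PalinArray_alt arr n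
instance (arr : List Int) (n : Int) (out : Int) : Decidable (Spec_PalinArray arr n out) := by unfold Spec_PalinArray; infer_instance

-- ===== CLAIM (what is proved, stated in full; the proofs are below) =====
def Claim_equal_PalinArray : Prop := ∀ (arr : List Int) (n : Int), Dom_PalinArray arr n → Spec_PalinArray arr n (PalinArray arr n)

-- ===== LEMMAS AND PROOFS =====

-- core's toDigitsCore, with enough fuel, prints the base-10 digits most-significant first
lemma pv_toDigitsCore_eq (f : Nat) : ∀ (n : Nat) (acc : List Char), n < f → 0 < n →
    Nat.toDigitsCore 10 f n acc = ((Nat.digits 10 n).map Nat.digitChar).reverse ++ acc := by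
  induction f with
  | zero => intro n acc h; omega
  | succ f ih =>
    intro n acc hf hn
    rw [Nat.toDigitsCore]
    by_cases h10 : n / 10 = 0
    · have hlt : n < 10 := by omega
      simp only [h10, if_true]
      rw [Nat.digits_def' (by norm_num) hn, h10, Nat.digits_zero]
      simp [Nat.mod_eq_of_lt hlt]
    · simp only [h10, if_false]
      rw [ih (n / 10) _ (by omega) (by omega)]
      rw [Nat.digits_def' (by norm_num) hn]
      simp

lemma pv_toDigits_eq (n : Nat) (hn : 0 < n) :
    Nat.toDigits 10 n = ((Nat.digits 10 n).map Nat.digitChar).reverse := by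
  have := pv_toDigitsCore_eq (n + 1) n [] (by omega) hn
  simpa [Nat.toDigits] using this

-- A's inner loop computes the digit-reversed value (in terms of Mathlib's digits/ofDigits)
lemma pv_revLoop_eq (n : Nat) : ∀ res : Int,
    pvRevLoop (n : Int) res
      = res * 10 ^ (Nat.digits 10 n).length
        + ((Nat.ofDigits 10 ((Nat.digits 10 n).reverse) : Nat) : Int) := by
  induction n using Nat.strong_induction_on with
  | _ n ih =>
    intro res
    rw [pvRevLoop]
    by_cases hn : 0 < n
    · have hpos : (0 : Int) < (n : Int) := by exact_mod_cast hn
      have hfd : PySem.Int.floordiv (n : Int) 10 = ((n / 10 : Nat) : Int) := by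
        exact_mod_cast PySem.Int.floordiv_natCast n 10
      have hmd : PySem.Int.mod (n : Int) 10 = ((n % 10 : Nat) : Int) := by
        exact_mod_cast PySem.Int.mod_natCast n 10
      simp only [hpos, if_true, hfd, hmd]
      rw [ih (n / 10) (Nat.div_lt_self hn (by norm_num))]
      rw [Nat.digits_def' (by norm_num : 1 < 10) hn]
      rw [List.reverse_cons, Nat.ofDigits_append, Nat.ofDigits_singleton]
      simp only [List.length_cons, List.length_reverse]
      push_cast
      ring
    · have h0 : n = 0 := by omega
      subst h0
      simp

-- digitChar is injective on digits below 10
lemma pv_digitChar_inj {a b : Nat} (ha : a < 10) (hb : b < 10)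
    (h : Nat.digitChar a = Nat.digitChar b) : a = b := by
  have key : ∀ x y : Fin 10, Nat.digitChar x.val = Nat.digitChar y.val → x = y := by decide
  have := key ⟨a, ha⟩ ⟨b, hb⟩ h
  exact congrArg Fin.val this

lemma pv_map_dc_inj : ∀ {l1 l2 : List Nat}, (∀ x ∈ l1, x < 10) → (∀ x ∈ l2, x < 10) →
    l1.map Nat.digitChar = l2.map Nat.digitChar → l1 = l2 := by
  intro l1
  induction l1 with
  | nil => intro l2 _ _ h; cases l2 <;> simp_all
  | cons a t ih =>
    intro l2 h1 h2 h
    cases l2 with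
    | nil => simp at h
    | cons b t2 =>
      simp only [List.map_cons, List.cons.injEq] at h
      have hab := pv_digitChar_inj (h1 a (by simp)) (h2 b (by simp)) h.1
      have := ih (fun x hx => h1 x (by simp [hx])) (fun x hx => h2 x (by simp [hx])) h.2
      simp [hab, this]

-- the reversed-digit value equals n iff the digit list is a palindrome
lemma pv_rev_eq_iff (n : Nat) (hn : 0 < n) :
    Nat.ofDigits 10 ((Nat.digits 10 n).reverse) = n ↔
      (Nat.digits 10 n).reverse = Nat.digits 10 n := by
  constructor
  · intro h
    have hL : Nat.digits 10 n = n % 10 :: Nat.digits 10 (n / 10) :=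
      Nat.digits_def' (by norm_num) hn
    by_cases hd0 : n % 10 = 0
    · exfalso
      set T := Nat.digits 10 (n / 10) with hT
      have hrev : (Nat.digits 10 n).reverse = T.reverse ++ [n % 10] := by
        rw [hL]; simp
      have hval : Nat.ofDigits 10 ((Nat.digits 10 n).reverse) = Nat.ofDigits 10 T.reverse := by
        rw [hrev, Nat.ofDigits_append, hd0]
        simp [Nat.ofDigits_singleton]
      have hlt : Nat.ofDigits 10 T.reverse < 10 ^ T.length := by
        have := Nat.ofDigits_lt_base_pow_length (b := 10) (l := T.reverse) (by norm_num)
          (fun x hx => Nat.digits_lt_base (by norm_num) (List.mem_reverse.mp hx))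
        simpa using this
      have hlen : (Nat.digits 10 n).length = T.length + 1 := by rw [hL]; simp
      have hge : 10 ^ (Nat.digits 10 n).length ≤ 10 * n :=
        Nat.base_pow_length_digits_le 10 n (by norm_num) (by omega)
      rw [hlen, pow_succ] at hge
      have : 10 ^ T.length ≤ n := by omega
      omega
    · have hmem : ∀ x ∈ (Nat.digits 10 n).reverse, x < 10 :=
        fun x hx => Nat.digits_lt_base (by norm_num) (List.mem_reverse.mp hx)
      have hlast : ∀ hh : (Nat.digits 10 n).reverse ≠ [],
          ((Nat.digits 10 n).reverse).getLast hh ≠ 0 := by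
        intro hh
        have h1 : ((Nat.digits 10 n).reverse).getLast? = (Nat.digits 10 n).head? :=
          List.getLast?_reverse
        have h2 := List.getLast?_eq_getLast_of_ne_nil hh
        have h3 : (Nat.digits 10 n).head? = some (n % 10) := by rw [hL]; rfl
        rw [h2, h3] at h1
        simp only [Option.some.injEq] at h1
        omega
      have := Nat.digits_ofDigits 10 (by norm_num) _ hmem hlast
      rw [h] at this
      exact this.symm
  · intro h
    rw [h, Nat.ofDigits_digits]

-- per-element equivalence of the two palindrome tests
lemma pv_elem_iff (i : Int) :
    (pvRevLoop i 0 = i) ↔ (PySem.Int.toChars i = (PySem.Int.toChars i).reverse) := by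
  rcases lt_trichotomy i 0 with hneg | hzero | hpos
  · -- negative: A's loop returns 0 ≠ i; B's string starts with '-' and ends with a digit
    have hA : pvRevLoop i 0 = 0 := by rw [pvRevLoop]; simp [not_lt.mpr (le_of_lt hneg)]
    have hm : 0 < i.natAbs := by omega
    have hs : PySem.Int.toChars i = '-' :: Nat.toDigits 10 i.natAbs := by
      simp [PySem.Int.toChars, hneg]
    constructor
    · intro h; rw [hA] at h; omega
    · intro h
      exfalso
      rw [hs, pv_toDigits_eq _ hm] at h
      set D := Nat.digits 10 i.natAbs with hD
      have hDne : D ≠ [] := Nat.digits_ne_nil_iff_ne_zero.mpr (by omega)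
      obtain ⟨d0, T, hDT⟩ := List.exists_cons_of_ne_nil hDne
      have hd0mem : d0 ∈ Nat.digits 10 i.natAbs := by rw [← hD, hDT]; simp
      have hd0 : d0 < 10 := Nat.digits_lt_base (by norm_num) hd0mem
      have hdc : Nat.digitChar d0 ≠ '-' := by
        have : ∀ x : Fin 10, Nat.digitChar x.val ≠ '-' := by decide
        exact this ⟨d0, hd0⟩
      -- compare first characters of both sides
      rw [hDT] at h
      simp only [List.map_cons, List.reverse_cons, List.reverse_append, List.reverse_reverse] at h
      -- h : '-' :: ((dc T).reverse ++ [dc d0]) = (dc d0 :: ...) form; extract heads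
      have := congrArg List.head? h
      simp at this
      exact hdc this.symm
  · subst hzero
    constructor
    · intro _; decide
    · intro _
      rw [pvRevLoop]; norm_num
  · -- positive
    obtain ⟨m, rfl⟩ : ∃ m : Nat, i = (m : Int) := ⟨i.toNat, (Int.toNat_of_nonneg (le_of_lt hpos)).symm⟩
    have hm : 0 < m := by exact_mod_cast hpos
    have hs : PySem.Int.toChars (m : Int) = ((Nat.digits 10 m).map Nat.digitChar).reverse := by
      simp only [PySem.Int.toChars, if_neg (by omega : ¬ ((m : Int) < 0)), Int.toNat_natCast]
      exact pv_toDigits_eq m hm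
    rw [pv_revLoop_eq m 0, hs]
    have hmem : ∀ x ∈ Nat.digits 10 m, x < 10 :=
      fun x hx => Nat.digits_lt_base (by norm_num) hx
    constructor
    · intro h
      have hofd : Nat.ofDigits 10 ((Nat.digits 10 m).reverse) = m := by
        simp only [zero_mul, zero_add] at h
        exact_mod_cast h
      have hpal := (pv_rev_eq_iff m hm).mp hofd
      rw [List.reverse_reverse, ← List.map_reverse, hpal]
    · intro h
      rw [List.reverse_reverse] at h
      have hmapeq : ((Nat.digits 10 m).reverse).map Nat.digitChar
          = (Nat.digits 10 m).map Nat.digitChar := by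
        rw [List.map_reverse]; exact h
      have hpal : (Nat.digits 10 m).reverse = Nat.digits 10 m :=
        pv_map_dc_inj (fun x hx => hmem x (List.mem_reverse.mp hx)) hmem hmapeq
      have := (pv_rev_eq_iff m hm).mpr hpal
      simp [this]

-- the two list traversals agree element by element
lemma pv_main (arr : List Int) (n : Int) : PalinArray arr n = PalinArray_alt arr n := by
  induction arr with
  | nil => rfl
  | cons i rest ih =>
    simp only [PalinArray, PalinArray_alt]
    by_cases h : pvRevLoop i 0 = i
    · have hb : PySem.Int.toChars i = (PySem.Int.toChars i).reverse := (pv_elem_iff i).mp h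
      simp [h, ← hb, ih]
    · have hb : PySem.Int.toChars i ≠ (PySem.Int.toChars i).reverse :=
        fun hc => h ((pv_elem_iff i).mpr hc)
      simp [h, hb]

-- ===== VERDICT (by name: the statement is the Claim_ definition above) =====
theorem PalinArray_spec : Claim_equal_PalinArray := by
  intro arr n _
  unfold Spec_PalinArray
  exact pv_main arr n
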